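-- pv_equiv track=rewrite | github.com/Cocowang666/msc_project | untitled0.py | is_group_mult_table
-- ===== SOURCE A (Python) =====
-- def is_mult_table(x):
--     if not isinstance(x,list):
--         return False
--     if len(x) <= 0:
--         return False
--     if isinstance(x[0],list):
--         sub_len=len(x[0])
--     for i in x:
--         if not isinstance(i,list):
--             return False
--         if len(i) != len(i):
--             return False
--         if len(i) != sub_len:
--             return False
--         for m in i:
--             if not isinstance(m,int):
--                 return False
--             if m<0 or m>=sub_len:
--                 return False
--     return True
--
-- def is_associative_mult_table(x):
--     if not is_mult_table(x):
--         return False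
--     for i in range(len(x)):
--         for j in range(len(x)):
--             for k in range(len(x)):
--                 if x[x[i][j]][k] != x[i][x[j][k]]:
--                     return False
--     return True
--
-- def row_mult_table(x,i):
--     assert is_mult_table(x)
--     assert isinstance(i, int)
--     assert 0 <= i and i < len(x)
--     return x[i]
--
-- def col_mult_table(x,i):
--     assert is_mult_table(x)
--     assert isinstance(i, int)
--     assert 0 <= i and i < len(x)
--     return [row[i] for row in x]
--
-- def identity_mult_table(x):
--     if not is_mult_table(x):
--         return -1
--     axis = []
--     for i in range(len(x)):
--         axis.append(i)
--     for i in range(len(x)):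
--         for j in range(len(x)):
--             if col_mult_table(x, j) == axis and row_mult_table(x, i) == axis:
--                 return x[i][j]
--     return -1
--
-- def is_group_mult_table(x):
--     if not is_mult_table(x):
--         return False
--     if not is_associative_mult_table(x):
--         return False
--     e = identity_mult_table(x)
--     if e == -1:
--         return False
--     for i in range(len(x)):
--         for j in range(len(x)):
--             if e in row_mult_table(x, i) and e in col_mult_table(x,j):
--                 continue
--             else:
--                 return False
--     return True
-- ===== SOURCE B (Python) =====
-- def is_group_mult_table(x):
--     # Latin-square re-implementation: an associative table is a group table
--     # iff every row and every column is a permutation (associative quasigroup = group).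
--     if not isinstance(x, list) or len(x) == 0:
--         return False
--     n = len(x)
--     for row in x:
--         if not isinstance(row, list) or len(row) != n:
--             return False
--         for m in row:
--             if not isinstance(m, int) or m < 0 or m >= n:
--                 return False
--     for a in range(n):
--         for b in range(n):
--             for c in range(n):
--                 if x[x[a][b]][c] != x[a][x[b][c]]:
--                     return False
--     for row in x:
--         if len(set(row)) != n:
--             return False
--     for j in range(n):
--         if len(set(row[j] for row in x)) != n:
--             return False
--     return True
-- ===== Notes on version B (the rewrite author's own statement) =====
-- stated objective: simpler
-- what changed: B drops A's identity-row/column search and per-cell inverse membership scans and instead checks, after the same shape and associativity validation, that every row and every column of the table is a permutation (Latin-square test), which is equivalent for associative tables because an associative quasigroup is a group.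
-- outside the precondition, e.g. on is_group_mult_table([[1, 1], [0, 0], [0, 0]]): A returns False, B returns False
import Mathlib
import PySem

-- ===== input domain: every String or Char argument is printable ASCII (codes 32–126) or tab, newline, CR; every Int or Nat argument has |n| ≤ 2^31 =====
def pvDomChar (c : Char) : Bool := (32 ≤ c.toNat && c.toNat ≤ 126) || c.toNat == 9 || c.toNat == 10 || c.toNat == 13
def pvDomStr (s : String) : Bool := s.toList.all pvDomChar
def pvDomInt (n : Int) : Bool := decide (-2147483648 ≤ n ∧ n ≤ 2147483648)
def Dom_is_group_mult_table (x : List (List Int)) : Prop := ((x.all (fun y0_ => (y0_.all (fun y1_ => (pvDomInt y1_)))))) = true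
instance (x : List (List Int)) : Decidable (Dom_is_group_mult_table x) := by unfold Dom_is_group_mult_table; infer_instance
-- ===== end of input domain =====

-- B replaces A's identity search and per-element inverse scan by a Latin-square (row/column
-- permutation) check, justified by "an associative table with identity and inverses = a group
-- = an associative Latin square"; objective: simpler.

-- ===== PORT A =====
-- isinstance checks are trivially true under the type List (List Int); `len(i) != len(i)` is never true and is dropped.
def is_mult_table (x : List (List Int)) : Bool :=
  if x.length ≤ 0 then false
  else
    let sub_len := (x.headD []).length
    x.all (fun i =>
      if i.length ≠ sub_len then false
      else i.all (fun m => !(decide (m < 0) || decide ((sub_len : Int) ≤ m))))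

-- Python raises IndexError when an index here is out of range; `getD` differs from Python only
-- there, and Pre_ excludes exactly those inputs.
def is_associative_mult_table (x : List (List Int)) : Bool :=
  if !is_mult_table x then false
  else
    (List.range x.length).all (fun i =>
      (List.range x.length).all (fun j =>
        (List.range x.length).all (fun k =>
          ((x.getD ((x.getD i []).getD j 0).toNat []).getD k 0)
            == ((x.getD i []).getD (((x.getD j []).getD k 0).toNat) 0))))

-- the Python asserts always hold at the internal call sites (checked table, 0 ≤ i < len(x))
def row_mult_table (x : List (List Int)) (i : Int) : List Int := x.getD i.toNat []

def col_mult_table (x : List (List Int)) (i : Int) : List Int :=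
  x.map (fun row => row.getD i.toNat 0)

def identity_mult_table (x : List (List Int)) : Int :=
  if !is_mult_table x then -1
  else
    let axis : List Int := (List.range x.length).foldl (fun (acc : List Int) (i : Nat) => acc ++ [(i : Int)]) []
    match (List.range x.length).findSome? (fun i =>
      (List.range x.length).findSome? (fun j =>
        if col_mult_table x (Int.ofNat j) == axis && row_mult_table x (Int.ofNat i) == axis
        then some ((x.getD i []).getD j 0) else none)) with
    | some v => v
    | none => -1

def is_group_mult_table (x : List (List Int)) : Bool :=
  if !is_mult_table x then false
  else if !is_associative_mult_table x then false
  else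
    let e := identity_mult_table x
    if e == -1 then false
    else
      (List.range x.length).all (fun i =>
        (List.range x.length).all (fun j =>
          (row_mult_table x (Int.ofNat i)).contains e && (col_mult_table x (Int.ofNat j)).contains e))

-- ===== PORT B =====
def is_group_mult_table_alt (x : List (List Int)) : Bool :=
  if x.length = 0 then false
  else if !(x.all (fun row =>
      row.length == x.length &&
      row.all (fun m => !(decide (m < 0) || decide ((x.length : Int) ≤ m))))) then false
  else if !((List.range x.length).all (fun i =>
      (List.range x.length).all (fun j =>
        (List.range x.length).all (fun k =>
          ((x.getD ((x.getD i []).getD j 0).toNat []).getD k 0)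
            == ((x.getD i []).getD (((x.getD j []).getD k 0).toNat) 0))))) then false
  else if !(x.all (fun row => (PySem.Set.ofList row).length == x.length)) then false
  else if !((List.range x.length).all (fun j =>
      (PySem.Set.ofList (x.map (fun row => row.getD j 0))).length == x.length)) then false
  else true

-- ===== PRECONDITION & SPEC =====
-- Pre_ excludes valid but NON-SQUARE multiplication tables (all rows of length len(x[0]) ≠ len(x),
-- entries in [0, len(x[0]))), on which A's associativity loop can raise IndexError.
def Pre_is_group_mult_table (x : List (List Int)) : Prop :=
  (x ≠ [] ∧ ∀ row ∈ x, row.length = (x.headD []).length ∧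
      ∀ m ∈ row, 0 ≤ m ∧ m < ((x.headD []).length : Int))
  → (x.headD []).length = x.length

instance (x : List (List Int)) : Decidable (Pre_is_group_mult_table x) := by
  unfold Pre_is_group_mult_table; infer_instance

def pvWitness_is_group_mult_table : List (List Int) := [[0]]

def Spec_is_group_mult_table (x : List (List Int)) (out : Bool) : Prop := out = is_group_mult_table_alt x
instance (x : List (List Int)) (out : Bool) : Decidable (Spec_is_group_mult_table x out) := by unfold Spec_is_group_mult_table; infer_instance

-- ===== CLAIM (what is proved, stated in full; the proofs are below) =====
def Claim_equal_is_group_mult_table : Prop := ∀ (x : List (List Int)), Dom_is_group_mult_table x → Pre_is_group_mult_table x → Spec_is_group_mult_table x (is_group_mult_table x)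

-- ===== LEMMAS AND PROOFS =====

-- the shape property A's `is_mult_table` decides
def VT (x : List (List Int)) : Prop :=
  x ≠ [] ∧ ∀ row ∈ x, row.length = (x.headD []).length ∧
      ∀ m ∈ row, 0 ≤ m ∧ m < ((x.headD []).length : Int)

-- the (i,j) entry of the table, as the ports read it
def Ent (x : List (List Int)) (i j : Nat) : Int := (x.getD i []).getD j 0

-- the associativity triple loop shared verbatim by the two ports
def assocB (x : List (List Int)) : Bool :=
  (List.range x.length).all (fun i =>
    (List.range x.length).all (fun j =>
      (List.range x.length).all (fun k =>
        ((x.getD ((x.getD i []).getD j 0).toNat []).getD k 0)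
          == ((x.getD i []).getD (((x.getD j []).getD k 0).toNat) 0))))

-- A's code after its two validation guards
def aTail (x : List (List Int)) : Bool :=
  let e := identity_mult_table x
  if e == -1 then false
  else
    (List.range x.length).all (fun i =>
      (List.range x.length).all (fun j =>
        (row_mult_table x (Int.ofNat i)).contains e && (col_mult_table x (Int.ofNat j)).contains e))

-- B's three checks
def bValid (x : List (List Int)) : Bool :=
  x.all (fun row =>
    row.length == x.length &&
    row.all (fun m => !(decide (m < 0) || decide ((x.length : Int) ≤ m))))

def bRows (x : List (List Int)) : Bool :=
  x.all (fun row => (PySem.Set.ofList row).length == x.length)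

def bCols (x : List (List Int)) : Bool :=
  (List.range x.length).all (fun j =>
    (PySem.Set.ofList (x.map (fun row => row.getD j 0))).length == x.length)

theorem A_unfold (x : List (List Int)) :
    is_group_mult_table x =
      if !is_mult_table x then false
      else if !is_associative_mult_table x then false
      else aTail x := rfl

theorem assocA_unfold (x : List (List Int)) :
    is_associative_mult_table x = if !is_mult_table x then false else assocB x := rfl

theorem B_unfold (x : List (List Int)) :
    is_group_mult_table_alt x =
      if x.length = 0 then false
      else if !bValid x then false
      else if !assocB x then false
      else if !bRows x then false
      else if !bCols x then false
      else true := rfl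

theorem is_mult_table_iff (x : List (List Int)) : is_mult_table x = true ↔ VT x := by
  unfold is_mult_table VT
  rcases x with _ | ⟨r, t⟩
  · simp
  · rw [if_neg (by simp)]
    simp only [List.all_eq_true, List.headD_cons]
    constructor
    · intro h
      refine ⟨by simp, ?_⟩
      intro row hrow
      have h2 := h row hrow
      split at h2
      · simp at h2
      · rename_i hne
        refine ⟨by omega, ?_⟩
        intro m hm
        have h3 := (List.all_eq_true.mp h2) m hm
        simp at h3
        omega
    · rintro ⟨-, h⟩
      intro row hrow
      obtain ⟨h1, h2⟩ := h row hrow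
      rw [if_neg (by omega)]
      rw [List.all_eq_true]
      intro m hm
      have h3 := h2 m hm
      simp
      omega

theorem set_len_iff (row : List Int) :
    ((PySem.Set.ofList row).length = row.length ↔ row.Nodup) := by
  constructor
  · intro h
    have hnd := PySem.Set.nodup_ofList row
    have hsub : PySem.Set.ofList row ⊆ row := fun a ha => (PySem.Set.mem_ofList row a).mp ha
    have hsp : List.Subperm (PySem.Set.ofList row) row := List.subperm_of_subset hnd hsub
    have hperm := hsp.perm_of_length_le (by omega)
    exact hperm.nodup hnd
  · intro h; rw [PySem.Set.ofList_eq_self_of_nodup row h]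

theorem axis_eq (n : Nat) :
    (List.range n).foldl (fun (acc : List Int) (i : Nat) => acc ++ [(i : Int)]) []
      = (List.range n).map (fun (i : Nat) => (i : Int)) := by
  have key : ∀ (l : List Nat) (acc : List Int),
      l.foldl (fun (acc : List Int) (i : Nat) => acc ++ [(i : Int)]) acc = acc ++ l.map (fun (i : Nat) => (i : Int)) := by
    intro l
    induction l with
    | nil => simp
    | cons a t ih => intro acc; rw [List.foldl_cons, ih, List.map_cons]; simp
  simpa using key (List.range n) []

theorem row_getD_eq (x : List (List Int)) (i : Nat) (hi : i < x.length) :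
    x.getD i [] = x[i] := List.getD_eq_getElem x [] hi

theorem ent_eq_getElem (x : List (List Int)) (i j : Nat) (hi : i < x.length)
    (hj : j < (x.getD i []).length) : Ent x i j = (x.getD i [])[j] := by
  unfold Ent
  exact List.getD_eq_getElem _ 0 hj

theorem row_eq_axis_iff (x : List (List Int)) (i : Nat) (hi : i < x.length)
    (hleni : (x.getD i []).length = x.length) :
    (x.getD i [] = (List.range x.length).map (fun (k : Nat) => (k : Int)))
      ↔ ∀ k < x.length, Ent x i k = (k : Int) := by
  constructor
  · intro h k hk
    have h2 : (x.getD i [])[k]'(by omega) = ((List.range x.length).map (fun (k : Nat) => (k : Int)))[k]'(by simpa using hk) :=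
      List.getElem_of_eq h _
    rw [ent_eq_getElem x i k hi (by omega)]
    simpa using h2
  · intro h
    apply List.ext_getElem (by simpa using hleni)
    intro k h1 h2
    have := h k (by omega)
    rw [ent_eq_getElem x i k hi (by omega)] at this
    simpa using this

theorem col_eq_axis_iff (x : List (List Int)) (j : Nat) :
    (x.map (fun row => row.getD j 0) = (List.range x.length).map (fun (k : Nat) => (k : Int)))
      ↔ ∀ k < x.length, Ent x k j = (k : Int) := by
  constructor
  · intro h k hk
    have h2 : (x.map (fun row => row.getD j 0))[k]'(by simpa using hk)
        = ((List.range x.length).map (fun (k : Nat) => (k : Int)))[k]'(by simpa using hk) :=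
      List.getElem_of_eq h _
    simp only [List.getElem_map, List.getElem_range] at h2
    unfold Ent
    rw [row_getD_eq x k hk]
    exact h2
  · intro h
    apply List.ext_getElem (by simp)
    intro k h1 h2
    have h3 := h k (by simpa using h1)
    unfold Ent at h3
    rw [row_getD_eq x k (by simpa using h1)] at h3
    simpa using h3

theorem mem_row_iff (x : List (List Int)) (i : Nat) (e : Int) (hi : i < x.length)
    (hleni : (x.getD i []).length = x.length) :
    (e ∈ x.getD i []) ↔ ∃ k, k < x.length ∧ Ent x i k = e := by
  rw [List.mem_iff_getElem]
  constructor
  · rintro ⟨k, hk, he⟩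
    exact ⟨k, by omega, by rw [ent_eq_getElem x i k hi (by omega)]; exact he⟩
  · rintro ⟨k, hk, he⟩
    exact ⟨k, by omega, by rw [← ent_eq_getElem x i k hi (by omega)]; exact he⟩

theorem mem_col_iff (x : List (List Int)) (j : Nat) (e : Int) :
    (e ∈ x.map (fun row => row.getD j 0)) ↔ ∃ k, k < x.length ∧ Ent x k j = e := by
  rw [List.mem_iff_getElem]
  constructor
  · rintro ⟨k, hk, he⟩
    simp only [List.getElem_map] at he
    refine ⟨k, by simpa using hk, ?_⟩
    unfold Ent
    rw [row_getD_eq x k (by simpa using hk)]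
    exact he
  · rintro ⟨k, hk, he⟩
    refine ⟨k, by simpa using hk, ?_⟩
    simp only [List.getElem_map]
    unfold Ent at he
    rw [row_getD_eq x k hk] at he
    exact he

theorem nodup_iff_inj (l : List Int) :
    l.Nodup ↔ ∀ (k1 : Nat) (h1 : k1 < l.length) (k2 : Nat) (h2 : k2 < l.length), l[k1]'h1 = l[k2]'h2 → k1 = k2 := by
  constructor
  · intro h k1 h1 k2 h2 he
    exact List.Nodup.getElem_inj_iff h |>.mp he
  · intro h
    rw [List.nodup_iff_injective_get]
    intro a b hab
    apply Fin.ext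
    exact h a.1 a.2 b.1 b.2 (by simpa [List.get_eq_getElem] using hab)

theorem core {n : Nat} (hn : 0 < n) (G : Fin n → Fin n → Fin n)
    (hassoc : ∀ a b c, G (G a b) c = G a (G b c)) :
    (∃ e, (∀ k, G e k = k) ∧ (∀ k, G k e = k) ∧ (∀ a, ∃ b, G a b = e) ∧ (∀ a, ∃ b, G b a = e))
    ↔ (∀ a, Function.Injective (G a) ∧ Function.Injective (fun b => G b a)) := by
  constructor
  · rintro ⟨e, hL, hR, hrinv, hlinv⟩ a
    obtain ⟨la, hla⟩ := hlinv a
    obtain ⟨ra, hra⟩ := hrinv a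
    constructor
    · intro b c h
      calc b = G e b := (hL b).symm
        _ = G (G la a) b := by rw [hla]
        _ = G la (G a b) := hassoc ..
        _ = G la (G a c) := by rw [h]
        _ = G (G la a) c := (hassoc ..).symm
        _ = G e c := by rw [hla]
        _ = c := hL c
    · intro b c h
      simp only at h
      calc b = G b e := (hR b).symm
        _ = G b (G a ra) := by rw [hra]
        _ = G (G b a) ra := (hassoc ..).symm
        _ = G (G c a) ra := by rw [h]
        _ = G c (G a ra) := hassoc ..
        _ = G c e := by rw [hra]
        _ = c := hR c
  · intro h
    set a0 : Fin n := ⟨0, hn⟩ with ha0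
    have rowsurj : ∀ a, Function.Surjective (G a) :=
      fun a => Finite.injective_iff_surjective.mp (h a).1
    have colsurj : ∀ a, Function.Surjective (fun b => G b a) :=
      fun a => Finite.injective_iff_surjective.mp (h a).2
    obtain ⟨e, he⟩ := rowsurj a0 a0
    have hRId : ∀ b, G b e = b := by
      intro b
      obtain ⟨c, hc⟩ := colsurj a0 b
      simp only at hc
      calc G b e = G (G c a0) e := by rw [hc]
        _ = G c (G a0 e) := hassoc ..
        _ = G c a0 := by rw [he]
        _ = b := hc
    obtain ⟨e', he'⟩ := colsurj a0 a0
    simp only at he'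
    have hLId : ∀ b, G e' b = b := by
      intro b
      obtain ⟨c, hc⟩ := rowsurj a0 b
      calc G e' b = G e' (G a0 c) := by rw [hc]
        _ = G (G e' a0) c := (hassoc ..).symm
        _ = G a0 c := by rw [he']
        _ = b := hc
    have hee : e = e' := by
      have h1 := hRId e'
      have h2 := hLId e
      rw [h2] at h1; exact h1
    refine ⟨e, hee ▸ hLId, hRId, fun a => rowsurj a e, fun a => ?_⟩
    obtain ⟨b, hb⟩ := colsurj a e
    exact ⟨b, hb⟩

theorem math_iff (x : List (List Int)) (hn : 0 < x.length)
    (hent : ∀ i < x.length, ∀ j < x.length, 0 ≤ Ent x i j ∧ Ent x i j < (x.length : Int))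
    (has : ∀ i < x.length, ∀ j < x.length, ∀ k < x.length,
      Ent x (Ent x i j).toNat k = Ent x i (Ent x j k).toNat) :
    (∃ e, e < x.length ∧ (∀ k < x.length, Ent x e k = (k : Int)) ∧ (∀ k < x.length, Ent x k e = (k : Int)) ∧
       (∀ i < x.length, ∃ j, j < x.length ∧ Ent x i j = (e : Int)) ∧
       (∀ j < x.length, ∃ i, i < x.length ∧ Ent x i j = (e : Int)))
    ↔ ((∀ i < x.length, ∀ k1 < x.length, ∀ k2 < x.length, Ent x i k1 = Ent x i k2 → k1 = k2) ∧
       (∀ j < x.length, ∀ k1 < x.length, ∀ k2 < x.length, Ent x k1 j = Ent x k2 j → k1 = k2)) := by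
  set n := x.length with hnn
  have hbound : ∀ (a b : Fin n), (Ent x a.1 b.1).toNat < n := by
    intro a b
    have := hent a.1 a.2 b.1 b.2
    omega
  set G : Fin n → Fin n → Fin n := fun a b => ⟨(Ent x a.1 b.1).toNat, hbound a b⟩ with hG
  have hval : ∀ a b : Fin n, (((G a b).1 : Nat) : Int) = Ent x a.1 b.1 := by
    intro a b
    have := hent a.1 a.2 b.1 b.2
    show (((Ent x a.1 b.1).toNat : Nat) : Int) = _
    omega
  have hassocG : ∀ a b c, G (G a b) c = G a (G b c) := by
    intro a b c
    apply Fin.ext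
    show (Ent x (Ent x a.1 b.1).toNat c.1).toNat = (Ent x a.1 (Ent x b.1 c.1).toNat).toNat
    rw [has a.1 a.2 b.1 b.2 c.1 c.2]
  constructor
  · rintro ⟨e, he, hL, hR, hri, hli⟩
    have hfin : ∃ e', (∀ k, G e' k = k) ∧ (∀ k, G k e' = k) ∧ (∀ a, ∃ b, G a b = e') ∧ (∀ a, ∃ b, G b a = e') := by
      refine ⟨⟨e, he⟩, ?_, ?_, ?_, ?_⟩
      · intro k; apply Fin.ext
        show (Ent x e k.1).toNat = k.1
        rw [hL k.1 k.2]; simp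
      · intro k; apply Fin.ext
        show (Ent x k.1 e).toNat = k.1
        rw [hR k.1 k.2]; simp
      · intro a
        obtain ⟨j, hj, hje⟩ := hri a.1 a.2
        refine ⟨⟨j, hj⟩, Fin.ext ?_⟩
        show (Ent x a.1 j).toNat = e
        rw [hje]; simp
      · intro a
        obtain ⟨i, hi, hie⟩ := hli a.1 a.2
        refine ⟨⟨i, hi⟩, Fin.ext ?_⟩
        show (Ent x i a.1).toNat = e
        rw [hie]; simp
    have hinj := (core hn G hassocG).mp hfin
    constructor
    · intro i hi k1 h1 k2 h2 heq
      have h3 : G ⟨i, hi⟩ ⟨k1, h1⟩ = G ⟨i, hi⟩ ⟨k2, h2⟩ := by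
        apply Fin.ext
        show (Ent x i k1).toNat = (Ent x i k2).toNat
        rw [heq]
      have := (hinj ⟨i, hi⟩).1 h3
      simpa using congrArg Fin.val this
    · intro j hj k1 h1 k2 h2 heq
      have h3 : G ⟨k1, h1⟩ ⟨j, hj⟩ = G ⟨k2, h2⟩ ⟨j, hj⟩ := by
        apply Fin.ext
        show (Ent x k1 j).toNat = (Ent x k2 j).toNat
        rw [heq]
      have := (hinj ⟨j, hj⟩).2 h3
      simpa using congrArg Fin.val this
  · rintro ⟨hr, hc⟩
    have hinj : ∀ a, Function.Injective (G a) ∧ Function.Injective (fun b => G b a) := by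
      intro a
      constructor
      · intro b c h
        have hv : Ent x a.1 b.1 = Ent x a.1 c.1 := by
          rw [← hval a b, ← hval a c, congrArg Fin.val h]
        exact Fin.ext (hr a.1 a.2 b.1 b.2 c.1 c.2 hv)
      · intro b c h
        simp only at h
        have hv : Ent x b.1 a.1 = Ent x c.1 a.1 := by
          rw [← hval b a, ← hval c a, congrArg Fin.val h]
        exact Fin.ext (hc a.1 a.2 b.1 b.2 c.1 c.2 hv)
    obtain ⟨e, hL, hR, hri, hli⟩ := (core hn G hassocG).mpr hinj
    refine ⟨e.1, e.2, ?_, ?_, ?_, ?_⟩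
    · intro k hk
      have h1 : (Ent x e.1 k).toNat = k := by simpa [hG] using congrArg Fin.val (hL ⟨k, hk⟩)
      have h2 := (hent e.1 e.2 k hk).1
      show Ent x e.1 k = (k : Int)
      omega
    · intro k hk
      have h1 : (Ent x k e.1).toNat = k := by simpa [hG] using congrArg Fin.val (hR ⟨k, hk⟩)
      have h2 := (hent k hk e.1 e.2).1
      show Ent x k e.1 = (k : Int)
      omega
    · intro i hi
      obtain ⟨b, hb⟩ := hri ⟨i, hi⟩
      have h1 : (Ent x i b.1).toNat = e.1 := by simpa [hG] using congrArg Fin.val hb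
      have h2 := (hent i hi b.1 b.2).1
      exact ⟨b.1, b.2, by omega⟩
    · intro j hj
      obtain ⟨b, hb⟩ := hli ⟨j, hj⟩
      have h1 : (Ent x b.1 j).toNat = e.1 := by simpa [hG] using congrArg Fin.val hb
      have h2 := (hent b.1 b.2 j hj).1
      exact ⟨b.1, b.2, by omega⟩

theorem assocB_iff (x : List (List Int)) :
    assocB x = true ↔ ∀ i < x.length, ∀ j < x.length, ∀ k < x.length,
      Ent x (Ent x i j).toNat k = Ent x i (Ent x j k).toNat := by
  unfold assocB Ent
  simp [List.all_eq_true, List.mem_range]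

theorem bValid_iff (x : List (List Int)) :
    bValid x = true ↔ ∀ row ∈ x, row.length = x.length ∧ ∀ m ∈ row, 0 ≤ m ∧ m < (x.length : Int) := by
  unfold bValid
  rw [List.all_eq_true]
  constructor
  · intro h row hrow
    have h2 := h row hrow
    rw [Bool.and_eq_true, beq_iff_eq] at h2
    refine ⟨h2.1, ?_⟩
    intro m hm
    have h3 := (List.all_eq_true.mp h2.2) m hm
    simp at h3
    omega
  · intro h row hrow
    obtain ⟨h1, h2⟩ := h row hrow
    rw [Bool.and_eq_true, beq_iff_eq]
    refine ⟨h1, List.all_eq_true.mpr ?_⟩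
    intro m hm
    have h3 := h2 m hm
    simp
    omega

theorem bRows_iff (x : List (List Int))
    (hlen : ∀ i < x.length, (x.getD i []).length = x.length) :
    bRows x = true ↔ ∀ i < x.length, ∀ k1 < x.length, ∀ k2 < x.length,
      Ent x i k1 = Ent x i k2 → k1 = k2 := by
  unfold bRows
  rw [List.all_eq_true]
  constructor
  · intro h i hi k1 h1 k2 h2 he
    have hmem : x.getD i [] ∈ x := by rw [row_getD_eq x i hi]; exact List.getElem_mem _
    have h4 := h _ hmem
    rw [beq_iff_eq] at h4
    have hnd : (x.getD i []).Nodup := (set_len_iff _).mp (by rw [h4, hlen i hi])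
    have hinj := (nodup_iff_inj _).mp hnd
    apply hinj k1 (by rw [hlen i hi]; exact h1) k2 (by rw [hlen i hi]; exact h2)
    rw [← ent_eq_getElem x i k1 hi (by rw [hlen i hi]; exact h1),
        ← ent_eq_getElem x i k2 hi (by rw [hlen i hi]; exact h2)]
    exact he
  · intro h row hrow
    obtain ⟨i, hi, hieq⟩ := List.mem_iff_getElem.mp hrow
    rw [beq_iff_eq]
    have hre : x.getD i [] = row := by rw [row_getD_eq x i hi]; exact hieq
    have hnd : row.Nodup := by
      rw [← hre]
      apply (nodup_iff_inj _).mpr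
      intro k1 h1 k2 h2 he
      apply h i hi k1 (by rw [← hlen i hi]; exact h1) k2 (by rw [← hlen i hi]; exact h2)
      rw [ent_eq_getElem x i k1 hi h1, ent_eq_getElem x i k2 hi h2]
      exact he
    rw [set_len_iff row |>.mpr hnd]
    rw [← hre, hlen i hi]
  
theorem bCols_iff (x : List (List Int))
    (hlen : ∀ i < x.length, (x.getD i []).length = x.length) :
    bCols x = true ↔ ∀ j < x.length, ∀ k1 < x.length, ∀ k2 < x.length,
      Ent x k1 j = Ent x k2 j → k1 = k2 := by
  unfold bCols
  rw [List.all_eq_true]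
  have colget : ∀ (j : Nat) (k : Nat) (hk : k < x.length),
      (x.map (fun row => row.getD j 0))[k]'(by simpa using hk) = Ent x k j := by
    intro j k hk
    simp only [List.getElem_map]
    unfold Ent
    rw [row_getD_eq x k hk]
  constructor
  · intro h j hj k1 h1 k2 h2 he
    have h4 := h j (List.mem_range.mpr hj)
    rw [beq_iff_eq] at h4
    have hnd : (x.map (fun row => row.getD j 0)).Nodup :=
      (set_len_iff _).mp (by rw [h4]; simp)
    have hinj := (nodup_iff_inj _).mp hnd
    apply hinj k1 (by simpa using h1) k2 (by simpa using h2)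
    rw [colget j k1 h1, colget j k2 h2]
    exact he
  · intro h j hjm
    have hj := List.mem_range.mp hjm
    rw [beq_iff_eq]
    have hnd : (x.map (fun row => row.getD j 0)).Nodup := by
      apply (nodup_iff_inj _).mpr
      intro k1 h1 k2 h2 he
      have h1' : k1 < x.length := by simpa using h1
      have h2' : k2 < x.length := by simpa using h2
      apply h j hj k1 h1' k2 h2'
      rw [← colget j k1 h1', ← colget j k2 h2']
      exact he
    rw [set_len_iff _ |>.mpr hnd]
    simp

-- the (col == axis and row == axis) condition of `identity_mult_table`
def IdP (x : List (List Int)) (i j : Nat) : Prop :=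
  (∀ k < x.length, Ent x k j = (k : Int)) ∧ (∀ k < x.length, Ent x i k = (k : Int))

theorem cond_iff (x : List (List Int)) (i j : Nat) (hi : i < x.length)
    (hlen : ∀ i < x.length, (x.getD i []).length = x.length) :
    ((col_mult_table x (Int.ofNat j) == (List.range x.length).map (fun (k : Nat) => (k : Int))
      && row_mult_table x (Int.ofNat i) == (List.range x.length).map (fun (k : Nat) => (k : Int))) = true)
      ↔ IdP x i j := by
  have hc : col_mult_table x (Int.ofNat j) = x.map (fun row => row.getD j 0) := by
    unfold col_mult_table; simp
  have hr : row_mult_table x (Int.ofNat i) = x.getD i [] := by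
    unfold row_mult_table; simp
  rw [Bool.and_eq_true, beq_iff_eq, beq_iff_eq, hc, hr]
  unfold IdP
  rw [col_eq_axis_iff x j, row_eq_axis_iff x i hi (hlen i hi)]

theorem pair_diag (x : List (List Int)) (i j : Nat) (hi : i < x.length) (hj : j < x.length)
    (hp : IdP x i j) : i = j := by
  have h1 := hp.2 j hj
  have h2 := hp.1 i hi
  have : (i : Int) = (j : Int) := by rw [← h1, ← h2]
  omega

theorem pair_unique (x : List (List Int)) (e1 e2 : Nat) (h1 : e1 < x.length) (h2 : e2 < x.length)
    (hp1 : IdP x e1 e1) (hp2 : IdP x e2 e2) : e1 = e2 := by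
  have ha := hp1.2 e2 h2
  have hb := hp2.1 e1 h1
  have : (e2 : Int) = (e1 : Int) := by rw [← ha, ← hb]
  omega

theorem identity_eq_of (x : List (List Int)) (hv : VT x)
    (hlen : ∀ i < x.length, (x.getD i []).length = x.length)
    (e : Nat) (he : e < x.length) (hp : IdP x e e) :
    identity_mult_table x = (e : Int) := by
  unfold identity_mult_table
  rw [(is_mult_table_iff x).mpr hv]
  simp only [Bool.not_true, Bool.false_eq_true, if_false]
  rw [axis_eq]
  have hcond := (cond_iff x e e he hlen).mpr hp
  have hsome : (List.range x.length).findSome? (fun i =>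
      (List.range x.length).findSome? (fun j =>
        if col_mult_table x (Int.ofNat j) == (List.range x.length).map (fun (k : Nat) => (k : Int))
          && row_mult_table x (Int.ofNat i) == (List.range x.length).map (fun (k : Nat) => (k : Int))
        then some ((x.getD i []).getD j 0) else none)) ≠ none := by
    intro hall
    rw [List.findSome?_eq_none_iff] at hall
    have h1 := hall e (List.mem_range.mpr he)
    rw [List.findSome?_eq_none_iff] at h1
    have h2 := h1 e (List.mem_range.mpr he)
    rw [if_pos hcond] at h2
    exact Option.some_ne_none _ h2
  obtain ⟨v, hvs⟩ := Option.ne_none_iff_exists'.mp hsome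
  rw [hvs]
  obtain ⟨i, him, hi2⟩ := List.exists_of_findSome?_eq_some hvs
  obtain ⟨j, hjm, hj2⟩ := List.exists_of_findSome?_eq_some hi2
  have hi : i < x.length := List.mem_range.mp him
  have hj : j < x.length := List.mem_range.mp hjm
  by_cases hcnd : (col_mult_table x (Int.ofNat j) == (List.range x.length).map (fun (k : Nat) => (k : Int))
      && row_mult_table x (Int.ofNat i) == (List.range x.length).map (fun (k : Nat) => (k : Int))) = true
  · have hp2 : IdP x i j := (cond_iff x i j hi hlen).mp hcnd
    have hij : i = j := pair_diag x i j hi hj hp2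
    subst hij
    have hie : i = e := pair_unique x i e hi he hp2 hp
    subst hie
    rw [if_pos hcnd] at hj2
    have hv2 : v = Ent x i i := (Option.some.injEq _ _).mp hj2.symm
    rw [hv2]
    exact hp.2 i hi
  · rw [if_neg (by simpa using hcnd)] at hj2
    simp at hj2

theorem identity_none (x : List (List Int)) (hv : VT x)
    (hlen : ∀ i < x.length, (x.getD i []).length = x.length)
    (hno : ¬ ∃ i, i < x.length ∧ ∃ j, j < x.length ∧ IdP x i j) :
    identity_mult_table x = -1 := by
  unfold identity_mult_table
  rw [(is_mult_table_iff x).mpr hv]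
  simp only [Bool.not_true, Bool.false_eq_true, if_false]
  rw [axis_eq]
  have hnone : (List.range x.length).findSome? (fun i =>
      (List.range x.length).findSome? (fun j =>
        if col_mult_table x (Int.ofNat j) == (List.range x.length).map (fun (k : Nat) => (k : Int))
          && row_mult_table x (Int.ofNat i) == (List.range x.length).map (fun (k : Nat) => (k : Int))
        then some ((x.getD i []).getD j 0) else none)) = none := by
    rw [List.findSome?_eq_none_iff]
    intro i him
    rw [List.findSome?_eq_none_iff]
    intro j hjm
    have hi : i < x.length := List.mem_range.mp him
    have hj : j < x.length := List.mem_range.mp hjm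
    rw [if_neg]
    intro hcnd
    exact hno ⟨i, hi, j, hj, (cond_iff x i j hi hlen).mp hcnd⟩
  rw [hnone]

theorem aTail_iff (x : List (List Int)) (hv : VT x) (hn : 0 < x.length)
    (hlen : ∀ i < x.length, (x.getD i []).length = x.length) :
    aTail x = true ↔
      (∃ e, e < x.length ∧ (∀ k < x.length, Ent x e k = (k : Int)) ∧ (∀ k < x.length, Ent x k e = (k : Int)) ∧
        (∀ i < x.length, ∃ j, j < x.length ∧ Ent x i j = (e : Int)) ∧
        (∀ j < x.length, ∃ i, i < x.length ∧ Ent x i j = (e : Int))) := by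
  unfold aTail
  constructor
  · intro h
    by_cases hex : ∃ i, i < x.length ∧ ∃ j, j < x.length ∧ IdP x i j
    · obtain ⟨i, hi, j, hj, hp⟩ := hex
      have hij : i = j := pair_diag x i j hi hj hp
      subst hij
      have hid := identity_eq_of x hv hlen i hi hp
      rw [hid] at h
      rw [if_neg (by simp)] at h
      rw [List.all_eq_true] at h
      refine ⟨i, hi, hp.2, hp.1, ?_, ?_⟩
      · intro a ha
        have h2 := List.all_eq_true.mp (h a (List.mem_range.mpr ha)) 0 (List.mem_range.mpr hn)
        rw [Bool.and_eq_true] at h2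
        have h3 := h2.1
        rw [List.contains_iff_mem] at h3
        have hrw : row_mult_table x (Int.ofNat a) = x.getD a [] := by unfold row_mult_table; simp
        rw [hrw] at h3
        exact (mem_row_iff x a (i : Int) ha (hlen a ha)).mp h3
      · intro b hb
        have h2 := List.all_eq_true.mp (h 0 (List.mem_range.mpr hn)) b (List.mem_range.mpr hb)
        rw [Bool.and_eq_true] at h2
        have h3 := h2.2
        rw [List.contains_iff_mem] at h3
        have hcw : col_mult_table x (Int.ofNat b) = x.map (fun row => row.getD b 0) := by
          unfold col_mult_table; simp
        rw [hcw] at h3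
        exact (mem_col_iff x b (i : Int)).mp h3
    · rw [identity_none x hv hlen hex] at h
      simp at h
  · rintro ⟨e, he, hL, hR, hri, hli⟩
    have hp : IdP x e e := ⟨hR, hL⟩
    rw [identity_eq_of x hv hlen e he hp]
    rw [if_neg (by simp)]
    rw [List.all_eq_true]
    intro i him
    rw [List.all_eq_true]
    intro j hjm
    have hi : i < x.length := List.mem_range.mp him
    have hj : j < x.length := List.mem_range.mp hjm
    rw [Bool.and_eq_true]
    constructor
    · rw [List.contains_iff_mem]
      have hrw : row_mult_table x (Int.ofNat i) = x.getD i [] := by unfold row_mult_table; simp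
      rw [hrw]
      exact (mem_row_iff x i (e : Int) hi (hlen i hi)).mpr (hri i hi)
    · rw [List.contains_iff_mem]
      have hcw : col_mult_table x (Int.ofNat j) = x.map (fun row => row.getD j 0) := by
        unfold col_mult_table; simp
      rw [hcw]
      exact (mem_col_iff x j (e : Int)).mpr (hli j hj)

-- ===== VERDICT (by name: the statement is the Claim_ definition above) =====
theorem is_group_mult_table_spec : Claim_equal_is_group_mult_table := by
  intro x _hdom hpre
  unfold Spec_is_group_mult_table
  by_cases hv : VT x
  · have hm : is_mult_table x = true := (is_mult_table_iff x).mpr hv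
    have hsq : (x.headD []).length = x.length := hpre hv
    have hn : 0 < x.length := List.length_pos_iff.mpr hv.1
    have hlen : ∀ i < x.length, (x.getD i []).length = x.length := by
      intro i hi
      rw [row_getD_eq x i hi]
      rw [(hv.2 x[i] (List.getElem_mem _)).1, hsq]
    have hent : ∀ i < x.length, ∀ j < x.length, 0 ≤ Ent x i j ∧ Ent x i j < (x.length : Int) := by
      intro i hi j hj
      have hmem : Ent x i j ∈ x.getD i [] := by
        rw [ent_eq_getElem x i j hi (by rw [hlen i hi]; exact hj)]
        exact List.getElem_mem _
      have hrmem : x.getD i [] ∈ x := by rw [row_getD_eq x i hi]; exact List.getElem_mem _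
      have := (hv.2 _ hrmem).2 _ hmem
      rw [hsq] at this
      exact this
    have hbv : bValid x = true := by
      rw [bValid_iff]
      intro row hrow
      obtain ⟨h1, h2⟩ := hv.2 row hrow
      rw [hsq] at h1
      refine ⟨h1, ?_⟩
      intro m hm
      have := h2 m hm
      rw [hsq] at this
      exact this
    rw [A_unfold, assocA_unfold, hm, B_unfold]
    have hz' : ¬ (x.length = 0) := by omega
    rw [if_neg hz', hbv]
    simp only [Bool.not_true, Bool.false_eq_true, if_false]
    by_cases has : assocB x = true
    · rw [has]
      simp only [Bool.not_true, Bool.false_eq_true, if_false]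
      have hbt : (if !bRows x then false else if !bCols x then false else true) = (bRows x && bCols x) := by
        cases hbr : bRows x <;> cases hbc : bCols x <;> simp
      rw [hbt]
      rw [Bool.eq_iff_iff, aTail_iff x hv hn hlen, Bool.and_eq_true,
        bRows_iff x hlen, bCols_iff x hlen]
      exact math_iff x hn hent (assocB_iff x |>.mp has)
    · rw [Bool.not_eq_true] at has
      rw [has]
      simp
  · have hm : is_mult_table x = false := by
      rw [← Bool.not_eq_true, is_mult_table_iff]; exact hv
    rw [A_unfold, hm, B_unfold]
    simp only [Bool.not_false, if_true]
    by_cases hz : x.length = 0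
    · rw [if_pos hz]
    · rw [if_neg hz]
      have hbv : bValid x = false := by
        rw [← Bool.not_eq_true, bValid_iff]
        intro hall
        apply hv
        have hne : x ≠ [] := by
          intro hxe; rw [hxe] at hz; exact hz rfl
        have hhd : x.headD [] ∈ x := by
          rcases x with _ | ⟨r, t⟩
          · exact absurd rfl hne
          · simp
        have hhl : (x.headD []).length = x.length := (hall _ hhd).1
        refine ⟨hne, ?_⟩
        intro row hrow
        obtain ⟨h1, h2⟩ := hall row hrow
        rw [← hhl] at h1
        refine ⟨h1, ?_⟩
        intro m hm
        have := h2 m hm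
        rw [← hhl] at this
        exact this
      rw [hbv]
      simp
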